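-- pv_equiv track=rewrite | github.com/edwardlu6/Python | Python/integer_functions.py | get_most_significant_digit
-- ===== SOURCE A (Python) =====
-- def get_least_significant_digit(a):
--     if a >= 0:
--         return(a % 10)
--     elif a < 0:
--         return(-a % 10)
--
-- def get_most_significant_digit(a):
--     if a < 0:
--         a = -a
--     b = 0
--     while a != 0:
--         b = get_least_significant_digit(a)
--         a //= 10
--     return b
-- ===== SOURCE B (Python) =====
-- def get_most_significant_digit(a):
--     return int(str(abs(a))[0])
-- ===== Notes on version B (the rewrite author's own statement) =====
-- stated objective: idiomatic
-- what changed: replaces the arithmetic mod/floor-divide stripping loop with a direct index into the decimal string representation of abs(a)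
import Mathlib
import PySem

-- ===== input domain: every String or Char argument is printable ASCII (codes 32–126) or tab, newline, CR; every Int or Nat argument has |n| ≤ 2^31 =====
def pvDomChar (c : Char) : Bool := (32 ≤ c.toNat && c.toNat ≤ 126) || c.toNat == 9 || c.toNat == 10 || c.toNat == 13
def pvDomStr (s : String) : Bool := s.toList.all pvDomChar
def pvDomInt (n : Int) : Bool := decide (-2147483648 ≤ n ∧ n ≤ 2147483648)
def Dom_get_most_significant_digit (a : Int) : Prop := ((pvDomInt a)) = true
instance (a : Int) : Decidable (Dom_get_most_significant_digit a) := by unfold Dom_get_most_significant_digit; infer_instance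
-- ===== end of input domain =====

-- B replaces A's arithmetic mod/floor-divide digit-stripping loop with a direct index into the
-- decimal string representation of abs(a) (more idiomatic; same cost).


-- ===== PORT A =====
def get_least_significant_digit (a : Int) : Int :=
  if a ≥ 0 then PySem.Int.mod a 10
  else PySem.Int.mod (-a) 10

-- Python's loop tests 'a != 0'; it is only ever entered with a ≥ 0 (after the sign flip), where
-- that test agrees with 'a ≤ 0' being false — stated this way so termination is provable.
def msdLoop (a b : Int) : Int :=
  if a ≤ 0 then b
  else msdLoop (PySem.Int.floordiv a 10) (get_least_significant_digit a)
termination_by a.toNat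
decreasing_by
  simp only [PySem.Int.floordiv_eq_ediv_of_pos (by norm_num : (0:Int) < 10)]
  omega

def get_most_significant_digit (a : Int) : Int :=
  msdLoop (if a < 0 then -a else a) 0

-- ===== PORT B =====
def get_most_significant_digit_alt (a : Int) : Int :=
  -- int(str(abs(a))[0]); abs(a) = if a < 0 then -a else a
  match PySem.Str.pyGet? (PySem.Int.toStr (if a < 0 then -a else a)) 0 with
  | some c => (PySem.Int.ofStr? (String.ofList [c])).getD 0  -- int(...); never none: first char of str(abs a) is a digit
  | none => 0                                            -- unreachable: str(abs a) is nonempty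

-- ===== PRECONDITION & SPEC =====
def Spec_get_most_significant_digit (a : Int) (out : Int) : Prop := out = get_most_significant_digit_alt a
instance (a : Int) (out : Int) : Decidable (Spec_get_most_significant_digit a out) := by unfold Spec_get_most_significant_digit; infer_instance

-- ===== CLAIM (what is proved, stated in full; the proofs are below) =====
def Claim_equal_get_most_significant_digit : Prop := ∀ (a : Int), Dom_get_most_significant_digit a → Spec_get_most_significant_digit a (get_most_significant_digit a)

-- ===== LEMMAS AND PROOFS =====

/-- The most significant decimal digit of a natural number (helper for the proof only). -/
def msdNat (n : Nat) : Nat :=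
  if n < 10 then n else msdNat (n / 10)
decreasing_by exact Nat.div_lt_self (by omega) (by omega)

theorem msdNat_lt_ten (n : Nat) : msdNat n < 10 := by
  induction n using Nat.strong_induction_on with
  | _ n ih =>
    rw [msdNat]
    split
    · omega
    · exact ih (n / 10) (Nat.div_lt_self (by omega) (by omega))

theorem msdLoop_eq_msdNat (n : Nat) (hn : 0 < n) (b : Int) :
    msdLoop (n : Int) b = (msdNat n : Int) := by
  induction n using Nat.strong_induction_on generalizing b with
  | _ n ih =>
    rw [msdLoop]
    have h1 : ¬ ((n : Int) ≤ 0) := by exact_mod_cast Nat.not_le.mpr hn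
    simp only [h1, if_false]
    have hfd : PySem.Int.floordiv (n : Int) 10 = ((n / 10 : Nat) : Int) := by
      exact_mod_cast PySem.Int.floordiv_natCast n 10
    have hlsd : get_least_significant_digit (n : Int) = ((n % 10 : Nat) : Int) := by
      simp only [get_least_significant_digit, if_pos (by positivity : (0:Int) ≤ (n:Int))]
      exact_mod_cast PySem.Int.mod_natCast n 10
    rw [hfd, hlsd]
    by_cases h10 : n < 10
    · have hz : n / 10 = 0 := Nat.div_eq_of_lt h10
      rw [hz]
      rw [msdLoop]
      simp only [Nat.cast_zero, le_refl, if_true]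
      rw [msdNat, if_pos h10, Nat.mod_eq_of_lt h10]
    · have hpos : 0 < n / 10 := Nat.div_pos (by omega) (by omega)
      rw [ih (n / 10) (Nat.div_lt_self (by omega) (by omega)) hpos]
      conv_rhs => rw [msdNat]
      rw [if_neg h10]

-- toDigitsCore (base 10) with enough fuel: the accumulator is appended on the right
theorem tdc_append (f : Nat) : ∀ (n : Nat) (ds : List Char), n < f →
    Nat.toDigitsCore 10 f n ds = Nat.toDigitsCore 10 f n [] ++ ds := by
  induction f with
  | zero => intro n ds h; omega
  | succ f ih =>
    intro n ds h
    simp only [Nat.toDigitsCore]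
    split
    · simp
    · rename_i hnz
      have hten : 10 ≤ n := by
        by_contra hc
        exact hnz (Nat.div_eq_of_lt (by omega))
      have hlt : n / 10 < f := by
        have : n / 10 < n := Nat.div_lt_self (by omega) (by omega)
        omega
      rw [ih (n / 10) ((n % 10).digitChar :: ds) hlt,
        ih (n / 10) [(n % 10).digitChar] hlt]
      simp

-- the fuel does not matter once it exceeds n
theorem tdc_fuel : ∀ (n f f' : Nat), n < f → n < f' →
    Nat.toDigitsCore 10 f n [] = Nat.toDigitsCore 10 f' n [] := by
  intro n
  induction n using Nat.strong_induction_on with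
  | _ n ih =>
    intro f f' hf hf'
    obtain ⟨g, rfl⟩ : ∃ g, f = g + 1 := ⟨f - 1, by omega⟩
    obtain ⟨g', rfl⟩ : ∃ g, f' = g + 1 := ⟨f' - 1, by omega⟩
    simp only [Nat.toDigitsCore]
    split
    · rfl
    · rename_i hnz
      have hten : 10 ≤ n := by
        by_contra hc
        exact hnz (Nat.div_eq_of_lt (by omega))
      have hlt : n / 10 < n := Nat.div_lt_self (by omega) (by omega)
      rw [tdc_append g _ _ (by omega), tdc_append g' _ _ (by omega),
        ih (n / 10) hlt g g' (by omega) (by omega)]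

theorem toDigits_step (n : Nat) (h : 10 ≤ n) :
    Nat.toDigits 10 n = Nat.toDigits 10 (n / 10) ++ [Nat.digitChar (n % 10)] := by
  have hnz : ¬ n / 10 = 0 := by
    have := Nat.div_pos h (by omega); omega
  have hlt : n / 10 < n := Nat.div_lt_self (by omega) (by omega)
  show Nat.toDigitsCore 10 (n + 1) n [] = _
  simp only [Nat.toDigitsCore, hnz, if_false]
  rw [tdc_append n _ _ (by omega),
    tdc_fuel (n / 10) n (n / 10 + 1) (by omega) (by omega)]
  rfl

theorem toDigits_lt_ten (n : Nat) (h : n < 10) :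
    Nat.toDigits 10 n = [Nat.digitChar n] := by
  have hz : n / 10 = 0 := Nat.div_eq_of_lt h
  show Nat.toDigitsCore 10 (n + 1) n [] = _
  simp only [Nat.toDigitsCore, hz, if_pos, Nat.mod_eq_of_lt h]

theorem head?_toDigits (n : Nat) :
    (Nat.toDigits 10 n).head? = some (Nat.digitChar (msdNat n)) := by
  induction n using Nat.strong_induction_on with
  | _ n ih =>
    by_cases h : n < 10
    · rw [toDigits_lt_ten n h, msdNat, if_pos h]; rfl
    · rw [toDigits_step n (by omega)]
      conv_rhs => rw [msdNat]
      rw [if_neg h]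
      have ihh := ih (n / 10) (Nat.div_lt_self (by omega) (by omega))
      rw [List.head?_append_of_ne_nil]
      · exact ihh
      · intro hnil; rw [hnil] at ihh; simp at ihh

theorem int_of_digitChar (m : Nat) (h : m < 10) :
    (PySem.Int.ofStr? (String.ofList [Nat.digitChar m])).getD 0 = (m : Int) := by
  interval_cases m <;> decide

theorem alt_eq_msdNat (a : Int) :
    get_most_significant_digit_alt a = (msdNat (if a < 0 then -a else a).toNat : Int) := by
  unfold get_most_significant_digit_alt
  generalize hg : (if a < 0 then -a else a) = n
  have hn0 : 0 ≤ n := by rw [← hg]; split <;> omega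
  have hts : (PySem.Int.toStr n).toList = Nat.toDigits 10 n.toNat := by
    rw [PySem.Int.toList_toStr, PySem.Int.toChars, if_neg (by omega)]
  have hget : PySem.Str.pyGet? (PySem.Int.toStr n) 0 =
      (Nat.toDigits 10 n.toNat).head? := by
    simp only [PySem.Str.pyGet?, hts]
    cases Nat.toDigits 10 n.toNat with
    | nil => rfl
    | cons c cs => simp [PySem.Chars.pyGet?, PySem.List.pyGet?, PySem.List.pyIdx?]
  rw [hget, head?_toDigits]
  exact int_of_digitChar _ (msdNat_lt_ten _)

-- ===== VERDICT (by name: the statement is the Claim_ definition above) =====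
theorem get_most_significant_digit_spec : Claim_equal_get_most_significant_digit := by
  intro a _
  unfold Spec_get_most_significant_digit get_most_significant_digit
  rw [alt_eq_msdNat]
  generalize hg : (if a < 0 then -a else a) = n
  have hn0 : 0 ≤ n := by rw [← hg]; split <;> omega
  by_cases hz : n = 0
  · rw [hz, msdLoop]
    have hm : msdNat 0 = 0 := by rw [msdNat]; simp
    simp [hm]
  · have hrw : n = ((n.toNat : Nat) : Int) := by omega
    conv_lhs => rw [hrw]
    rw [msdLoop_eq_msdNat _ (by omega)]
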